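-- pv_equiv track=rewrite | github.com/org404/pyrum-scripts | rpc_send.py | generator_names
-- ===== SOURCE A (Python) =====
-- import itertools
-- import string
--
-- def generator_names(n: int = None, names: list = None):
--     if names:
--         for name in names:
--             yield name
--         return
--
--     # else case
--     i = 0
--     for size in itertools.count(1):
--         for s in itertools.product(string.ascii_lowercase, repeat=size):
--             yield "".join(s)
--             i += 1
--             # exit if we have certain range (n)
--             if n is not None and i >= n: return
-- ===== SOURCE B (Python) =====
-- def generator_names(n: int = None, names: list = None):
--     if names:
--         yield from names
--         return
--
--     # else case: direct index -> bijective base-26 string conversion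
--     i = 0
--     while True:
--         i += 1
--         m = i
--         chars = []
--         while m > 0:
--             m -= 1
--             chars.append(chr(97 + m % 26))
--             m //= 26
--         yield "".join(reversed(chars))
--         if n is not None and i >= n:
--             return
-- ===== Notes on version B (the rewrite author's own statement) =====
-- stated objective: alternative
-- what changed: Replaces the nested itertools.count/itertools.product enumeration with a single counter converted directly to its bijective base-26 string on each step.
import Mathlib
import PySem

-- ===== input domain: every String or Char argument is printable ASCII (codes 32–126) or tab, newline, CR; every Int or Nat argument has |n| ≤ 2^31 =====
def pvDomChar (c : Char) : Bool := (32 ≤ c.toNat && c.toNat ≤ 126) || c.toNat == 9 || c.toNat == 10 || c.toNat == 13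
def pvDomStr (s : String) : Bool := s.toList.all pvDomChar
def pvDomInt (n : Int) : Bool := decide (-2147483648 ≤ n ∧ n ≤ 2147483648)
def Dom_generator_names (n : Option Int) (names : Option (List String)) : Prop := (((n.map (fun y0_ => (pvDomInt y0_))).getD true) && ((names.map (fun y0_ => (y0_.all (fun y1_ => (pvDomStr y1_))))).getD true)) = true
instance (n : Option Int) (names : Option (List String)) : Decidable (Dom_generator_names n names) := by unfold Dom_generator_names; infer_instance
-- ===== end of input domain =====

-- B is an alternative algorithm: instead of A's nested itertools.count/product enumeration it
-- converts a single counter directly to its bijective base-26 string. Return-value equivalence only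
-- (both are generators in Python; ports return the list of yielded items).

-- ===== PORT A =====
-- string.ascii_lowercase
def pvLower : List Char := "abcdefghijklmnopqrstuvwxyz".toList

-- itertools.product(string.ascii_lowercase, repeat=size), in product order (first slot slowest)
def pvProdChars : Nat → List (List Char)
  | 0 => [[]]
  | k+1 => pvLower.flatMap (fun c => (pvProdChars k).map (fun t => c :: t))

def pvProdStrings (k : Nat) : List String := (pvProdChars k).map (fun t => String.mk t)

-- inner `for s in itertools.product(...)` loop: yield, i += 1, test `n is not None and i >= n`
def pvInnerA (n : Option Int) : List String → Nat → List String → List String × Nat × Bool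
  | [], i, acc => (acc, i, false)
  | s :: rest, i, acc =>
    match n with
    | some n' =>
      if n' ≤ ((i+1 : Nat) : Int) then (acc ++ [s], i+1, true)
      else pvInnerA (some n') rest (i+1) (acc ++ [s])
    | none => pvInnerA none rest (i+1) (acc ++ [s])

-- outer `for size in itertools.count(1)` loop; fuel bounds the (in Python unbounded) outer loop,
-- it is large enough to be unreachable on every input Pre_ admits
def pvOuterA (n : Option Int) : Nat → Nat → Nat → List String → List String
  | 0, _, _, acc => acc
  | fuel+1, size, i, acc =>
    match pvInnerA n (pvProdStrings size) i acc with
    | (acc', i', true) => acc'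
    | (acc', i', false) => pvOuterA n fuel (size+1) i' acc'

def generator_names (n : Option Int) (names : Option (List String)) : List String :=
  match names with
  | some (x :: xs) => x :: xs   -- `if names:` truthy: yield each name
  | _ => pvOuterA n (match n with | some n' => n'.toNat + 1 | none => 0) 1 0 []

-- ===== PORT B =====
-- inner `while m > 0` digit loop of Source B (chars collected last-digit-first, then reversed)
def pvToCharsRev (m : Nat) : List Char :=
  if m = 0 then [] else Char.ofNat (97 + (m-1) % 26) :: pvToCharsRev ((m-1)/26)
decreasing_by exact Nat.lt_of_le_of_lt (Nat.div_le_self _ _) (by omega)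

def pvToB26 (i : Nat) : String := String.mk (pvToCharsRev i).reverse

-- the `while True` loop: i += 1, yield, test `n is not None and i >= n`
def pvLoopB (n' : Int) (i : Nat) : List String :=
  if n' ≤ ((i+1 : Nat) : Int) then [pvToB26 (i+1)] else pvToB26 (i+1) :: pvLoopB n' (i+1)
termination_by (n' - i).toNat
decreasing_by omega

def generator_names_alt (n : Option Int) (names : Option (List String)) : List String :=
  match names, n with
  | some (x :: xs), _ => x :: xs
  | some [], some n' => pvLoopB n' 0
  | none, some n' => pvLoopB n' 0
  | _, none => []   -- Python B (like A) never returns here; excluded by Pre_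

-- ===== PRECONDITION & SPEC =====
-- Pre_ excludes exactly the inputs where Python A (and B) loop forever: names falsy and n = None.
def Pre_generator_names (n : Option Int) (names : Option (List String)) : Prop :=
  names.getD [] ≠ [] ∨ n.isSome = true
instance (n : Option Int) (names : Option (List String)) : Decidable (Pre_generator_names n names) := by
  unfold Pre_generator_names; infer_instance

def pvWitness_generator_names : Option Int × Option (List String) := (some 3, none)

def Spec_generator_names (n : Option Int) (names : Option (List String)) (out : List String) : Prop := out = generator_names_alt n names
instance (n : Option Int) (names : Option (List String)) (out : List String) : Decidable (Spec_generator_names n names out) := by unfold Spec_generator_names; infer_instance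

-- ===== CLAIM (what is proved, stated in full; the proofs are below) =====
def Claim_equal_generator_names : Prop := ∀ (n : Option Int) (names : Option (List String)), Dom_generator_names n names → Pre_generator_names n names → Spec_generator_names n names (generator_names n names)

-- ===== LEMMAS AND PROOFS =====

-- proof-only helpers
def pvFd : Nat → Nat → List Char
  | 0, _ => []
  | k+1, r => pvFd k (r/26) ++ [Char.ofNat (97 + r % 26)]

def pvOff : Nat → Nat
  | 0 => 0
  | k+1 => 26 * (pvOff k + 1)

def pvCanon (t : Nat) : List String := (List.range t).map (fun r => pvToB26 (r+1))

theorem pvToCharsRev_pos (m : Nat) (h : m ≠ 0) :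
    (pvToCharsRev m).reverse = (pvToCharsRev ((m-1)/26)).reverse ++ [Char.ofNat (97 + (m-1) % 26)] := by
  rw [pvToCharsRev]; simp [h]

theorem pvLower_eq : pvLower = (List.range 26).map (fun q => Char.ofNat (97 + q)) := by decide

theorem pvOff_succ (k : Nat) : pvOff (k+1) = pvOff k + 26^(k+1) := by
  induction k with
  | zero => decide
  | succ k ih =>
    calc pvOff (k+2) = 26 * (pvOff (k+1) + 1) := rfl
      _ = 26 * (pvOff k + 26^(k+1) + 1) := by rw [ih]
      _ = 26 * (pvOff k + 1) + 26^(k+2) := by ring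
      _ = pvOff (k+1) + 26^(k+2) := rfl

theorem pvOff_ge (k : Nat) : k ≤ pvOff k := by
  induction k with
  | zero => simp [pvOff]
  | succ k ih => rw [pvOff]; omega

theorem pvRangeMul (a b : Nat) :
    List.range (a*b) = (List.range a).flatMap (fun q => (List.range b).map (fun r => q*b + r)) := by
  induction a with
  | zero => simp
  | succ a ih =>
    rw [Nat.succ_mul, List.range_add, ih, List.range_succ, List.flatMap_append]
    simp

theorem pvFd_split (k q r : Nat) (hq : q < 26) (hr : r < 26^k) :
    pvFd (k+1) (q * 26^k + r) = Char.ofNat (97 + q) :: pvFd k r := by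
  induction k generalizing q r with
  | zero =>
    interval_cases r
    simp [pvFd, Nat.mod_eq_of_lt hq]
  | succ k ih =>
    have h26 : q * 26^(k+1) + r = 26 * (q * 26^k) + r := by ring_nf
    have hdiv : (q * 26^(k+1) + r) / 26 = q * 26^k + r / 26 := by
      rw [h26, Nat.mul_add_div (by norm_num)]
    have hmod : (q * 26^(k+1) + r) % 26 = r % 26 := by
      rw [h26, Nat.mul_add_mod]
    have hr' : r / 26 < 26^k := by
      have : (26:Nat)^(k+1) = 26 * 26^k := by ring
      omega
    show pvFd (k+2) _ = _
    rw [pvFd, hdiv, hmod, ih q (r/26) hq hr']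
    rfl

theorem pvProdChars_eq (k : Nat) : pvProdChars k = (List.range (26^k)).map (pvFd k) := by
  induction k with
  | zero => simp [pvProdChars, pvFd]
  | succ k ih =>
    rw [pvProdChars, ih, pvLower_eq]
    have : (26:Nat)^(k+1) = 26 * 26^k := by ring
    rw [this, pvRangeMul, List.flatMap_map, List.map_flatMap]
    apply List.flatMap_congr
    intro q hq
    rw [List.mem_range] at hq
    simp only [List.map_map]
    apply List.map_congr_left
    intro r hr
    rw [List.mem_range] at hr
    simp only [Function.comp]
    exact (pvFd_split k q r hq hr).symm

theorem pvTc_key (k r : Nat) (hr : r < 26^(k+1)) :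
    (pvToCharsRev (pvOff k + r + 1)).reverse = pvFd (k+1) r := by
  induction k generalizing r with
  | zero =>
    have h26 : r < 26 := by simpa using hr
    rw [pvToCharsRev_pos _ (by omega)]
    have h1 : pvOff 0 + r + 1 - 1 = r := by simp [pvOff]
    rw [h1, Nat.div_eq_of_lt h26]
    simp [pvToCharsRev, pvFd, Nat.mod_eq_of_lt h26]
  | succ k ih =>
    have hm : pvOff (k+1) + r + 1 - 1 = 26 * (pvOff k + 1) + r := by rw [pvOff]; omega
    rw [pvToCharsRev_pos _ (by omega), hm, Nat.mul_add_div (by norm_num), Nat.mul_add_mod]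
    have hr' : r / 26 < 26^(k+1) := by
      have : (26:Nat)^(k+2) = 26 * 26^(k+1) := by ring
      omega
    have harg : pvOff k + 1 + r / 26 = pvOff k + r / 26 + 1 := by omega
    rw [harg, ih _ hr']
    rfl

theorem pvProdStrings_eq (k : Nat) :
    pvProdStrings (k+1) = (List.range (26^(k+1))).map (fun r => pvToB26 (pvOff k + r + 1)) := by
  rw [pvProdStrings, pvProdChars_eq, List.map_map]
  apply List.map_congr_left
  intro r hr
  rw [List.mem_range] at hr
  simp only [Function.comp]
  rw [pvToB26, pvTc_key k r hr]

-- the stopping test, in terms of t = max n'.toNat 1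
theorem pvCond_iff (n' : Int) (i : Nat) :
    (n' ≤ ((i+1 : Nat) : Int)) ↔ max n'.toNat 1 ≤ i + 1 := by omega

theorem pvInnerA_spec (n' : Int) (ss : List String) :
    ∀ i acc, i < max n'.toNat 1 →
    pvInnerA (some n') ss i acc =
      if i + ss.length < max n'.toNat 1 then (acc ++ ss, i + ss.length, false)
      else (acc ++ ss.take (max n'.toNat 1 - i), max n'.toNat 1, true) := by
  induction ss with
  | nil =>
    intro i acc hi
    rw [pvInnerA, List.length_nil, if_pos (by omega)]
    simp
  | cons s rest ih =>
    intro i acc hi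
    rw [pvInnerA]
    by_cases hc : n' ≤ ((i+1 : Nat) : Int)
    · have ht : max n'.toNat 1 = i + 1 := by rw [pvCond_iff] at hc; omega
      rw [if_pos hc, List.length_cons,
          if_neg (show ¬ (i + (rest.length + 1) < max n'.toNat 1) by omega)]
      have htk : max n'.toNat 1 - i = 1 := by omega
      rw [htk, ht]
      simp
    · have hc' : ¬ max n'.toNat 1 ≤ i + 1 := by rw [← pvCond_iff]; exact hc
      rw [if_neg hc, ih (i+1) (acc ++ [s]) (by omega), List.length_cons]
      by_cases h2 : i + (rest.length + 1) < max n'.toNat 1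
      · rw [if_pos (by omega), if_pos h2]
        simp
        omega
      · rw [if_neg (by omega), if_neg h2]
        have htk : (s :: rest).take (max n'.toNat 1 - i) = s :: rest.take (max n'.toNat 1 - (i+1)) := by
          have h3 : max n'.toNat 1 - i = (max n'.toNat 1 - (i+1)) + 1 := by omega
          rw [h3, List.take_succ_cons]
        rw [htk]
        simp

theorem pvCanon_append (a m : Nat) :
    pvCanon a ++ (List.range m).map (fun r => pvToB26 (a + r + 1)) = pvCanon (a + m) := by
  rw [pvCanon, pvCanon, List.range_add, List.map_append, List.map_map]
  congr 1

theorem pvOuterA_spec (n' : Int) :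
    ∀ fuel k, pvOff k < max n'.toNat 1 → max n'.toNat 1 ≤ pvOff (k + fuel) →
    pvOuterA (some n') fuel (k+1) (pvOff k) (pvCanon (pvOff k)) = pvCanon (max n'.toNat 1) := by
  intro fuel
  induction fuel with
  | zero => intro k h1 h2; rw [Nat.add_zero] at h2; omega
  | succ fuel ih =>
    intro k h1 h2
    rw [pvOuterA, pvProdStrings_eq,
        pvInnerA_spec n' _ (pvOff k) (pvCanon (pvOff k)) h1]
    have hlen : ((List.range (26^(k+1))).map (fun r => pvToB26 (pvOff k + r + 1))).length = 26^(k+1) := by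
      simp
    by_cases hc : pvOff k + 26^(k+1) < max n'.toNat 1
    · rw [if_pos (by rw [hlen]; exact hc)]
      simp only
      rw [hlen, pvCanon_append, ← pvOff_succ]
      have := ih (k+1) (by rw [pvOff_succ]; omega) (by
        have : k + 1 + fuel = k + (fuel + 1) := by omega
        rw [this]; exact h2)
      exact this
    · rw [if_neg (by rw [hlen]; exact hc)]
      simp only
      rw [← List.map_take, List.take_range]
      have hmin : min (max n'.toNat 1 - pvOff k) (26^(k+1)) = max n'.toNat 1 - pvOff k := by omega
      rw [hmin, pvCanon_append]
      congr 1
      omega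

theorem pvLoopB_spec (n' : Int) :
    ∀ d i, max n'.toNat 1 = i + d + 1 →
    pvLoopB n' i = (List.range (d+1)).map (fun r => pvToB26 (i + r + 1)) := by
  intro d
  induction d with
  | zero =>
    intro i ht
    rw [pvLoopB, if_pos (by rw [pvCond_iff]; omega)]
    simp
  | succ d ih =>
    intro i ht
    rw [pvLoopB, if_neg (by rw [pvCond_iff]; omega)]
    rw [ih (i+1) (by omega)]
    conv_rhs => rw [List.range_succ_eq_map]
    rw [List.map_cons, List.map_map]
    congr 1
    apply List.map_congr_left
    intro r _
    simp only [Function.comp_apply]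
    congr 1
    omega

theorem pvElse_eq (n' : Int) :
    pvOuterA (some n') (n'.toNat + 1) 1 0 [] = pvLoopB n' 0 := by
  have h0 : pvOff 0 = 0 := rfl
  have hcanon0 : pvCanon 0 = [] := rfl
  have ha : pvOuterA (some n') (n'.toNat + 1) 1 0 [] = pvCanon (max n'.toNat 1) := by
    have := pvOuterA_spec n' (n'.toNat + 1) 0 (by simp [pvOff])
      (by
        have h1 : max n'.toNat 1 ≤ n'.toNat + 1 := by omega
        have h2 : (0 + (n'.toNat + 1)) ≤ pvOff (0 + (n'.toNat + 1)) := pvOff_ge _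
        omega)
    rw [h0, hcanon0] at this
    exact this
  have hb : pvLoopB n' 0 = pvCanon (max n'.toNat 1) := by
    rw [pvLoopB_spec n' (max n'.toNat 1 - 1) 0 (by omega)]
    rw [pvCanon]
    have : max n'.toNat 1 - 1 + 1 = max n'.toNat 1 := by omega
    rw [this]
    apply List.map_congr_left
    intro r _
    congr 1
    omega
  rw [ha, hb]

-- ===== VERDICT (by name: the statement is the Claim_ definition above) =====
theorem generator_names_spec : Claim_equal_generator_names := by
  intro n names _ hpre
  unfold Spec_generator_names generator_names generator_names_alt
  match names with
  | some (x :: xs) => rfl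
  | some [] =>
    match n with
    | some n' => simpa using pvElse_eq n'
    | none => simp [Pre_generator_names] at hpre
  | none =>
    match n with
    | some n' => simpa using pvElse_eq n'
    | none => simp [Pre_generator_names] at hpre
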